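-- pv_equiv track=rewrite | github.com/rimir-cc/tw-ext-connect | scripts/python/tw_connector/tid.py | fields_to_tid_string
-- ===== SOURCE A (Python) =====
-- def fields_to_tid_string(fields: dict[str, str]) -> str:
--     """Convert a field dict to .tid format string."""
--     body = fields.get("text", "")
--     header_fields = {k: v for k, v in fields.items() if k != "text"}
--
--     # Standard field ordering: title first, then type, then rest alphabetically
--     priority = ["title", "type", "tags", "created", "modified"]
--     ordered = []
--     for key in priority:
--         if key in header_fields:
--             ordered.append((key, header_fields.pop(key)))
--     for key in sorted(header_fields):
--         ordered.append((key, header_fields[key]))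
--
--     lines = [f"{k}: {v}" for k, v in ordered]
--     lines.append("")  # blank separator
--     lines.append(body)
--     if not body.endswith("\n"):
--         lines.append("")  # trailing newline
--     return "\n".join(lines)
-- ===== SOURCE B (Python) =====
-- def fields_to_tid_string(fields: dict[str, str]) -> str:
--     """Convert a field dict to .tid format string."""
--     priority = ["title", "type", "tags", "created", "modified"]
--     rank = {k: i for i, k in enumerate(priority)}
--     body = fields.get("text", "")
--     keys = sorted((k for k in fields if k != "text"),
--                   key=lambda k: (rank.get(k, 5), k))
--     lines = [f"{k}: {fields[k]}" for k in keys] + ["", body]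
--     if not body.endswith("\n"):
--         lines.append("")
--     return "\n".join(lines)
-- ===== Notes on version B (the rewrite author's own statement) =====
-- stated objective: alternative
-- what changed: A's two-phase ordering (a destructive priority loop that pops matched keys out of the header dict, then a separate alphabetical sort of the leftovers) is replaced by one table-driven sort: a rank dict maps each priority key to its index and all header keys are sorted once by the composite key (rank.get(k, 5), k), with no dict mutation.
import Mathlib
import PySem

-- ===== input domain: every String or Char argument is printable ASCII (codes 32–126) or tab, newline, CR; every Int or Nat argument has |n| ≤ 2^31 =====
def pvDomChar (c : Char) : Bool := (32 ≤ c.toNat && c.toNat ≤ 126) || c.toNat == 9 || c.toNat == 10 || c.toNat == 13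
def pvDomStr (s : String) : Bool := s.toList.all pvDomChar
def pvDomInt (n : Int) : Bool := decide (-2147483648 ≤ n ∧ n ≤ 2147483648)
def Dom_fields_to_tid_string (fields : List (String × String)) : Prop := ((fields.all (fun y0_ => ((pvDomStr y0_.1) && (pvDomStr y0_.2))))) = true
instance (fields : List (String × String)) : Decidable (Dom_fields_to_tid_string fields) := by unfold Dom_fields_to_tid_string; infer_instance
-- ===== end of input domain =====

-- B replaces A's destructive priority-loop-with-pop plus second sort by one rank-table-driven
-- composite-key sort over all header keys (alternative decomposition, same cost).

-- ===== PORT A =====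
-- the body of A's header-dict comprehension '{k: v for k, v in fields.items() if k != "text"}'
def aHeaderStep (h : PySem.Dict String String) (kv : String × String) : PySem.Dict String String :=
  if kv.1 == "text" then h else h.insert kv.1 kv.2

-- the body of A's priority loop ('if key in header_fields: ordered.append((key, header_fields.pop(key)))')
def aPriorityStep (st : List (String × String) × PySem.Dict String String) (key : String) :
    List (String × String) × PySem.Dict String String :=
  if st.2.contains key then
    match st.2.pop? key with
    | some (v, h') => (st.1 ++ [(key, v)], h')
    | none => st      -- unreachable: guarded by `contains`
  else st

def fields_to_tid_string (fields : List (String × String)) : String :=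
  let d := PySem.Dict.ofList fields
  let body := d.getD "text" ""
  let header := d.items.foldl aHeaderStep PySem.Dict.empty
  let priority := ["title", "type", "tags", "created", "modified"]
  let st := priority.foldl aPriorityStep ([], header)
  -- `header_fields[key]` cannot raise here (key comes from the dict's own keys), so getD is exact
  let ordered := (PySem.List.sorted st.2.keys (fun k => k)).foldl
    (fun acc key => acc ++ [(key, st.2.getD key "")]) st.1
  let lines := ordered.map (fun kv => kv.1 ++ ": " ++ kv.2)
  let lines := lines ++ [""]
  let lines := lines ++ [body]
  let lines := if PySem.Str.endswith body "\n" then lines else lines ++ [""]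
  PySem.Str.join "\n" lines

-- ===== PORT B =====
def fields_to_tid_string_alt (fields : List (String × String)) : String :=
  let priority := ["title", "type", "tags", "created", "modified"]
  let rank : PySem.Dict String Int :=
    (PySem.List.enumerate priority).foldl (fun d p => d.insert p.2 p.1) PySem.Dict.empty
  let d := PySem.Dict.ofList fields
  let body := d.getD "text" ""
  let keys := PySem.List.sorted2 (d.keys.filter (fun k => k != "text"))
    (fun k => rank.getD k 5) (fun k => k)
  -- `fields[k]` cannot raise here (k is one of the dict's keys), so getD is exact
  let lines := keys.map (fun k => k ++ ": " ++ d.getD k "") ++ ["", body]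
  let lines := if PySem.Str.endswith body "\n" then lines else lines ++ [""]
  PySem.Str.join "\n" lines

-- ===== PRECONDITION & SPEC =====
def Spec_fields_to_tid_string (fields : List (String × String)) (out : String) : Prop := out = fields_to_tid_string_alt fields
instance (fields : List (String × String)) (out : String) : Decidable (Spec_fields_to_tid_string fields out) := by unfold Spec_fields_to_tid_string; infer_instance

-- ===== CLAIM (what is proved, stated in full; the proofs are below) =====
def Claim_equal_fields_to_tid_string : Prop := ∀ (fields : List (String × String)), Dom_fields_to_tid_string fields → Spec_fields_to_tid_string fields (fields_to_tid_string fields)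

-- ===== LEMMAS AND PROOFS =====

theorem find?_filter_ne (t : List (String × String)) (k k' : String) (h : k' ≠ k) :
    List.find? (fun p => p.1 == k') (t.filter (fun p => !(p.1 == k))) =
    List.find? (fun p => p.1 == k') t := by
  induction t with
  | nil => rfl
  | cons kv t ih =>
    rw [List.filter_cons]
    by_cases hk : kv.1 = k
    · have h1 : (!(kv.1 == k)) = false := by simp [hk]
      have h2 : (kv.1 == k') = false := by simp [hk, Ne.symm h]
      rw [h1, if_neg (by simp), List.find?_cons, h2, ih]
    · have h1 : (!(kv.1 == k)) = true := by simp [hk]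
      rw [h1, if_pos rfl, List.find?_cons, List.find?_cons]
      cases hkv : (kv.1 == k') with
      | true => rfl
      | false => exact ih

theorem get?_erase_of_ne (d : PySem.Dict String String) (k k' : String) (h : k' ≠ k) :
    (d.erase k).get? k' = d.get? k' := by
  obtain ⟨l⟩ := d
  simp only [PySem.Dict.erase, PySem.Dict.get?]
  rw [find?_filter_ne _ _ _ h]

theorem keys_erase (d : PySem.Dict String String) (k : String) :
    (d.erase k).keys = d.keys.filter (fun x => !(x == k)) := by
  obtain ⟨l⟩ := d
  simp only [PySem.Dict.erase, PySem.Dict.keys]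
  induction l with
  | nil => rfl
  | cons kv t ih => by_cases hk : kv.1 = k <;> simp [hk, ih]

theorem contains_erase_of_ne (d : PySem.Dict String String) (k k' : String) (h : k' ≠ k) :
    (d.erase k).contains k' = d.contains k' := by
  rw [PySem.Dict.contains_eq_decide_mem_keys, PySem.Dict.contains_eq_decide_mem_keys, keys_erase]
  simp [List.mem_filter, h]

theorem nodup_keys_erase (d : PySem.Dict String String) (k : String) (h : d.keys.Nodup) :
    (d.erase k).keys.Nodup := by
  rw [keys_erase]; exact h.filter _

theorem getD_erase_of_ne (d : PySem.Dict String String) (k k' : String) (h : k' ≠ k) (dflt : String) :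
    (d.erase k).getD k' dflt = d.getD k' dflt := by
  simp only [PySem.Dict.getD, get?_erase_of_ne d k k' h]

theorem map_fst_filter_fst {α β : Type} (l : List (α × β)) (p : α → Bool) :
    (l.filter (fun kv => p kv.1)).map Prod.fst = (l.map Prod.fst).filter p := by
  induction l with
  | nil => rfl
  | cons kv t ih => by_cases hp : p kv.1 <;> simp [hp, ih]

-- the header comprehension over a duplicate-free items list just filters out the "text" pair
theorem headerFold (l : List (String × String)) (hnd : (l.map Prod.fst).Nodup) :
    (l.foldl aHeaderStep PySem.Dict.empty).items = l.filter (fun kv => !(kv.1 == "text")) := by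
  have hstep : ∀ (h : PySem.Dict String String) (kv : String × String),
      aHeaderStep h kv = if (!(kv.1 == "text")) = true then h.insert kv.1 kv.2 else h := by
    intro h kv
    cases hkv : (kv.1 == "text") <;> simp [aHeaderStep, hkv]
  rw [show List.foldl aHeaderStep (PySem.Dict.empty) l = List.foldl (fun (h : PySem.Dict String String) kv => if (!(kv.1 == "text")) = true then h.insert kv.1 kv.2 else h) PySem.Dict.empty l from by rw [funext (fun h => funext (fun kv => hstep h kv))]]
  rw [PySem.List.foldl_if_eq_foldl_filter]
  rw [PySem.Dict.items_foldl_insert_fresh _ Prod.fst Prod.snd _ (by simp [PySem.Dict.contains_empty])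
      (by rw [map_fst_filter_fst l (fun x => !(x == "text"))]; exact hnd.filter _)]
  simp [PySem.Dict.empty]

theorem priFold (ks : List String) (hnd : ks.Nodup) (acc : List (String × String))
    (h : PySem.Dict String String) (hh : h.keys.Nodup) :
    (ks.foldl aPriorityStep (acc, h)).1 =
      acc ++ (ks.filter (fun k => h.contains k)).map (fun k => (k, h.getD k "")) ∧
    (ks.foldl aPriorityStep (acc, h)).2.items =
      h.items.filter (fun kv => decide (kv.1 ∉ ks)) := by
  induction ks generalizing acc h with
  | nil => simp
  | cons k ks ih =>
    have hknotin : k ∉ ks := (List.nodup_cons.mp hnd).1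
    have hndks : ks.Nodup := (List.nodup_cons.mp hnd).2
    rw [List.foldl_cons]
    cases hc : h.contains k with
    | false =>
      have hstep : aPriorityStep (acc, h) k = (acc, h) := by
        simp [aPriorityStep, hc]
      rw [hstep]
      obtain ⟨h1, h2⟩ := ih hndks acc h hh
      constructor
      · rw [h1, List.filter_cons, hc]
        simp only [Bool.false_eq_true, if_false]
      · rw [h2]
        apply List.filter_congr
        intro kv hkv
        have hne : kv.1 ≠ k := by
          intro he
          have := PySem.Dict.mem_keys_of_mem_items h hkv
          rw [he] at this
          rw [PySem.Dict.contains_eq_decide_mem_keys] at hc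
          simp at hc
          exact hc this
        simp [hne]
    | true =>
      obtain ⟨v, hv⟩ : ∃ v, h.get? k = some v := by
        cases hg : h.get? k with
        | none =>
          rw [PySem.Dict.get?_eq_none_iff_not_mem_keys] at hg
          rw [PySem.Dict.contains_eq_decide_mem_keys] at hc
          simp at hc
          exact absurd hc hg
        | some v => exact ⟨v, rfl⟩
      have hstep : aPriorityStep (acc, h) k = (acc ++ [(k, v)], h.erase k) := by
        simp [aPriorityStep, hc, PySem.Dict.pop?, hv]
      rw [hstep]
      obtain ⟨h1, h2⟩ := ih hndks (acc ++ [(k, v)]) (h.erase k) (nodup_keys_erase h k hh)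
      constructor
      · rw [h1, List.filter_cons, hc]
        rw [if_pos rfl]
        have hfc : ks.filter (fun k' => (h.erase k).contains k') = ks.filter (fun k' => h.contains k') := by
          apply List.filter_congr
          intro k' hk'
          exact contains_erase_of_ne h k k' (fun he => hknotin (he ▸ hk'))
        have hmc : (ks.filter (fun k' => h.contains k')).map (fun k' => (k', (h.erase k).getD k' "")) =
            (ks.filter (fun k' => h.contains k')).map (fun k' => (k', h.getD k' "")) := by
          apply List.map_congr_left
          intro k' hk'
          have : k' ∈ ks := List.mem_of_mem_filter hk'
          rw [getD_erase_of_ne h k k' (fun he => hknotin (he ▸ this))]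
        rw [hfc, hmc]
        have hvD : h.getD k "" = v := by simp [PySem.Dict.getD, hv]
        simp [List.map_cons, hvD]
      · rw [h2]
        show ((h.erase k).items).filter _ = _
        have : (h.erase k).items = h.items.filter (fun p => !(p.1 == k)) := rfl
        rw [this, List.filter_filter]
        apply List.filter_congr
        intro kv _
        by_cases he : kv.1 = k
        · simp [he]
        · by_cases hm : kv.1 ∈ ks <;> simp [he, hm]

theorem sorted2_eq_sorted_lex {α : Type} (xs : List α) (k1 : α → Int) (k2 : α → String) :
    PySem.List.sorted2 xs k1 k2 = PySem.List.sorted xs (fun a => toLex (k1 a, k2 a)) := by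
  have hb : (fun (a b : α) => decide (k1 a < k1 b) || (!decide (k1 b < k1 a) && decide (k2 a < k2 b)))
      = (fun a b => decide ((toLex (k1 a, k2 a)) < toLex (k1 b, k2 b))) := by
    funext a b
    rw [Bool.eq_iff_iff]
    simp only [Bool.or_eq_true, Bool.and_eq_true, Bool.not_eq_true', decide_eq_true_eq,
      decide_eq_false_iff_not, Prod.Lex.lt_iff, ofLex_toLex]
    constructor
    · rintro (h1 | ⟨hnl, h2⟩)
      · exact Or.inl h1
      · rcases lt_or_eq_of_le (not_lt.mp hnl) with h | h
        · exact Or.inl h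
        · exact Or.inr ⟨h, h2⟩
    · rintro (h1 | ⟨heq, h2⟩)
      · exact Or.inl h1
      · exact Or.inr ⟨by rw [heq]; exact lt_irrefl _, h2⟩
  simp only [PySem.List.sorted2, PySem.List.sorted, Bool.false_eq_true, if_false]
  rw [hb]

def bRank : PySem.Dict String Int :=
  (PySem.List.enumerate ["title", "type", "tags", "created", "modified"]).foldl
    (fun d p => d.insert p.2 p.1) PySem.Dict.empty

theorem bRank_eq : bRank = PySem.Dict.mk
    [("title", 0), ("type", 1), ("tags", 2), ("created", 3), ("modified", 4)] := by decide

theorem bRank_not_mem (k : String) (h : k ∉ ["title", "type", "tags", "created", "modified"]) :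
    bRank.getD k 5 = 5 := by
  simp only [List.mem_cons, not_or] at h
  obtain ⟨h1, h2, h3, h4, h5, -⟩ := h
  have e1 : ("title" == k) = false := by rw [beq_eq_false_iff_ne]; exact Ne.symm h1
  have e2 : ("type" == k) = false := by rw [beq_eq_false_iff_ne]; exact Ne.symm h2
  have e3 : ("tags" == k) = false := by rw [beq_eq_false_iff_ne]; exact Ne.symm h3
  have e4 : ("created" == k) = false := by rw [beq_eq_false_iff_ne]; exact Ne.symm h4
  have e5 : ("modified" == k) = false := by rw [beq_eq_false_iff_ne]; exact Ne.symm h5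
  simp [bRank_eq, PySem.Dict.getD, PySem.Dict.get?, List.find?, e1, e2, e3, e4, e5]

theorem bRank_lt_of_mem (k : String) (h : k ∈ ["title", "type", "tags", "created", "modified"]) :
    bRank.getD k 5 < 5 := by
  simp only [List.mem_cons, List.not_mem_nil, or_false] at h
  rcases h with h | h | h | h | h <;> subst h <;> decide

theorem bRank_pairwise :
    List.Pairwise (fun a b => bRank.getD a 5 < bRank.getD b 5)
      ["title", "type", "tags", "created", "modified"] := by decide

-- the composite-key sort of B produces exactly A's "priority keys first, then the rest
-- alphabetically" arrangement, for any duplicate-free key list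
theorem orderEq (ks : List String) (hnd : ks.Nodup) :
    PySem.List.sorted2 ks (fun k => bRank.getD k 5) (fun k => k)
      = (["title", "type", "tags", "created", "modified"].filter (fun k => decide (k ∈ ks)))
        ++ PySem.List.sorted
            (ks.filter (fun k => decide (k ∉ ["title", "type", "tags", "created", "modified"])))
            (fun k => k) := by
  set pri : List String := ["title", "type", "tags", "created", "modified"] with hpri
  rw [sorted2_eq_sorted_lex]
  apply PySem.List.sorted_eq_of_perm_of_pairwise_lt
  · -- permutation
    have hS : (PySem.List.sorted (ks.filter (fun k => decide (k ∉ pri))) (fun k => k)).Perm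
        (ks.filter (fun k => decide (k ∉ pri))) := PySem.List.sorted_perm _ _ _
    have hP : (pri.filter (fun k => decide (k ∈ ks))).Perm
        (ks.filter (fun k => decide (k ∈ pri))) := by
      rw [List.perm_ext_iff_of_nodup ((by decide : pri.Nodup).filter _) (hnd.filter _)]
      intro a
      simp only [List.mem_filter, decide_eq_true_eq]
      tauto
    refine (hP.append hS).trans ?_
    have : (fun (x : String) => decide (x ∉ pri)) = (fun x => !decide (x ∈ pri)) := by
      funext x; simp [decide_not]
    rw [this]
    exact List.filter_append_perm _ ks
  · -- pairwise strictly increasing lex key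
    rw [List.pairwise_append]
    refine ⟨?_, ?_, ?_⟩
    · refine List.Pairwise.imp ?_ (bRank_pairwise.filter (fun k => decide (k ∈ ks)))
      intro a b h
      exact Prod.Lex.lt_iff.mpr (Or.inl h)
    · have hS' : (ks.filter (fun k => decide (k ∉ pri))).Nodup := hnd.filter _
      have hnd2 : (PySem.List.sorted (ks.filter (fun k => decide (k ∉ pri))) (fun k => k)).Nodup :=
        ((PySem.List.sorted_perm _ _ _).nodup_iff).mpr hS'
      have hle : List.Pairwise (fun (a b : String) => a ≤ b)
          (PySem.List.sorted (ks.filter (fun k => decide (k ∉ pri))) (fun k => k)) :=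
        PySem.List.sorted_pairwise _ _
      refine List.Pairwise.imp_of_mem ?_ (hle.and hnd2)
      intro a b ha hb hab
      have hamem : a ∉ pri := by
        have := (PySem.List.mem_sorted _ _ _ a).mp ha
        simpa using (List.mem_filter.mp this).2
      have hbmem : b ∉ pri := by
        have := (PySem.List.mem_sorted _ _ _ b).mp hb
        simpa using (List.mem_filter.mp this).2
      refine Prod.Lex.lt_iff.mpr (Or.inr ⟨?_, ?_⟩)
      · simp [bRank_not_mem a hamem, bRank_not_mem b hbmem]
      · exact lt_of_le_of_ne hab.1 hab.2
    · intro a ha b hb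
      have hamem : a ∈ pri := List.mem_of_mem_filter ha
      have hbmem : b ∉ pri := by
        have := (PySem.List.mem_sorted _ _ _ b).mp hb
        simpa using (List.mem_filter.mp this).2
      refine Prod.Lex.lt_iff.mpr (Or.inl ?_)
      simp only [ofLex_toLex]
      calc bRank.getD a 5 < 5 := bRank_lt_of_mem a hamem
        _ = bRank.getD b 5 := (bRank_not_mem b hbmem).symm

theorem fields_to_tid_string_spec' : ∀ (fields : List (String × String)),
    fields_to_tid_string fields = fields_to_tid_string_alt fields := by
  intro fields
  simp only [fields_to_tid_string, fields_to_tid_string_alt]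
  set d := PySem.Dict.ofList fields with hd
  set l := d.items with hl
  have hndk : d.keys.Nodup := PySem.Dict.nodup_keys_ofList fields
  have hndl : (l.map Prod.fst).Nodup := hndk
  set lf := l.filter (fun kv => !(kv.1 == "text")) with hlf
  set ks := lf.map Prod.fst with hks
  have hndks : ks.Nodup := by
    rw [hks, hlf, map_fst_filter_fst l (fun x => !(x == "text"))]
    exact hndl.filter _
  set pri : List String := ["title", "type", "tags", "created", "modified"] with hpri
  -- the header dict
  set header := l.foldl aHeaderStep PySem.Dict.empty with hheader
  have hhi : header.items = lf := headerFold l hndl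
  have hhk : header.keys = ks := by
    show header.items.map Prod.fst = ks
    rw [hhi, hks]
  have hhknd : header.keys.Nodup := by rw [hhk]; exact hndks
  -- lookups in header agree with lookups in d
  have hsub_lf : ∀ {kv : String × String}, kv ∈ lf → kv ∈ l := by
    intro kv h; exact List.mem_of_mem_filter h
  have hheader_getD : ∀ k ∈ header.keys, header.getD k "" = d.getD k "" := by
    intro k hk
    obtain ⟨⟨k', v⟩, hmem, hfst⟩ := List.mem_map.mp hk
    cases hfst
    rw [PySem.Dict.getD_of_mem_items header hmem hhknd,
        PySem.Dict.getD_of_mem_items d (hsub_lf (by rw [← hhi]; exact hmem)) hndk]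
  -- the priority loop
  obtain ⟨hst1, hst2⟩ := priFold pri (by rw [hpri]; decide) [] header hhknd
  set st := pri.foldl aPriorityStep ([], header) with hst
  have hst2i : st.2.items = lf.filter (fun kv => decide (kv.1 ∉ pri)) := by
    rw [hst2, hhi]
  have hst2k : st.2.keys = ks.filter (fun k => decide (k ∉ pri)) := by
    show st.2.items.map Prod.fst = _
    rw [hst2i, hks, map_fst_filter_fst lf (fun x => decide (x ∉ pri))]
  have hst2knd : st.2.keys.Nodup := by rw [hst2k]; exact hndks.filter _
  have hst2_getD : ∀ k ∈ st.2.keys, st.2.getD k "" = d.getD k "" := by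
    intro k hk
    obtain ⟨⟨k', v⟩, hmem, hfst⟩ := List.mem_map.mp hk
    cases hfst
    have hmem_l : (k', v) ∈ l := hsub_lf (by
      have : (k', v) ∈ lf.filter (fun kv => decide (kv.1 ∉ pri)) := by rw [← hst2i]; exact hmem
      exact List.mem_of_mem_filter this)
    rw [PySem.Dict.getD_of_mem_items st.2 hmem hst2knd,
        PySem.Dict.getD_of_mem_items d hmem_l hndk]
  -- A's ordered list
  have hcont : ∀ k, header.contains k = decide (k ∈ ks) := by
    intro k
    rw [PySem.Dict.contains_eq_decide_mem_keys, hhk]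
  have hpart1 : (pri.filter (fun k => header.contains k)).map (fun k => (k, header.getD k ""))
      = (pri.filter (fun k => decide (k ∈ ks))).map (fun k => (k, d.getD k "")) := by
    rw [List.filter_congr (fun k _ => hcont k)]
    apply List.map_congr_left
    intro k hk
    have hkk : k ∈ header.keys := by
      rw [hhk]
      simpa using (List.mem_filter.mp hk).2
    rw [hheader_getD k hkk]
  have hpart2 : (PySem.List.sorted st.2.keys (fun k => k)).map (fun key => (key, st.2.getD key ""))
      = (PySem.List.sorted (ks.filter (fun k => decide (k ∉ pri))) (fun k => k)).map
          (fun k => (k, d.getD k "")) := by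
    rw [show (PySem.List.sorted st.2.keys (fun k => k)).map (fun key => (key, st.2.getD key ""))
        = (PySem.List.sorted st.2.keys (fun k => k)).map (fun k => (k, d.getD k "")) from
      List.map_congr_left (fun k hk => by
        rw [hst2_getD k ((PySem.List.mem_sorted _ _ _ k).mp hk)]), hst2k]
  have hordered :
      (PySem.List.sorted st.2.keys (fun k => k)).foldl
        (fun acc key => acc ++ [(key, st.2.getD key "")]) st.1
      = ((pri.filter (fun k => decide (k ∈ ks)))
          ++ PySem.List.sorted (ks.filter (fun k => decide (k ∉ pri))) (fun k => k)).map
          (fun k => (k, d.getD k "")) := by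
    rw [PySem.List.foldl_append_singleton_eq_map, hst1, List.nil_append, hpart1, hpart2,
      List.map_append]
  -- B's key list
  have hbkeys : d.keys.filter (fun k => k != "text") = ks := by
    rw [hks, hlf, map_fst_filter_fst l (fun x => !(x == "text"))]
    rfl
  have horder := orderEq ks hndks
  rw [← hpri] at horder
  rw [hordered, hbkeys]
  rw [show ((PySem.List.enumerate pri).foldl (fun d p => d.insert p.2 p.1) PySem.Dict.empty)
      = bRank from rfl]
  rw [horder]
  simp only [List.map_append, List.map_map, Function.comp_def, List.append_assoc,
    List.cons_append, List.nil_append]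

-- ===== VERDICT (by name: the statement is the Claim_ definition above) =====
theorem fields_to_tid_string_spec : Claim_equal_fields_to_tid_string := by
  intro fields _
  exact fields_to_tid_string_spec' fields
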